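-- pv_equiv track=rewrite | github.com/anuragsaroha/CodingPractice | TeamPractice/Palindrome.py | is_palindrome_phrase
-- ===== SOURCE A (Python) =====
-- def is_palindrome_phrase(input_phrase):
--     if len(input_phrase) <= 1:
--         return True
--     left = 0
--     right = len(input_phrase) - 1
--     if input_phrase[left] == ' ':
--         return is_palindrome_phrase(input_phrase[left+1:])
--     elif input_phrase[right] == ' ':
--         return is_palindrome_phrase(input_phrase[:right])
--     elif input_phrase[left] == input_phrase[right]:
--         return is_palindrome_phrase(input_phrase[left+1:right])
--     else:
--         return False
-- ===== SOURCE B (Python) =====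
-- def is_palindrome_phrase(input_phrase):
--     letters = [c for c in input_phrase if c != ' ']
--     return letters == letters[::-1]
-- ===== Notes on version B (the rewrite author's own statement) =====
-- stated objective: faster
-- what changed: Replaced A's O(n^2) recursion (which copies a slice of the string at every step while peeling spaces and matched end characters) by a single pass that filters out spaces once and compares the result with its reverse.
import Mathlib
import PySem

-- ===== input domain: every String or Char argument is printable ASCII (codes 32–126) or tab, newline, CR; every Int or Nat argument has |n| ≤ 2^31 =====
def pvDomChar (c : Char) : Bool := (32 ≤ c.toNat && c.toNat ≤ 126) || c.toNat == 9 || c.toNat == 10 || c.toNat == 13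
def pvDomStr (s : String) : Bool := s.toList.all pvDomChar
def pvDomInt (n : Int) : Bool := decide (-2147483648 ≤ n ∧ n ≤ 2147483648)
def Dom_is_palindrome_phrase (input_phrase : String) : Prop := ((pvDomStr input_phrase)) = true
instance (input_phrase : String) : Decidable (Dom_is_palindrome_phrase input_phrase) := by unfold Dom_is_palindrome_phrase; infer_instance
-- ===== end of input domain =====

-- B filters the spaces out in one pass and compares with the reverse, instead of A's
-- recursion that slices a copy of the string at every step; strings are handled as their
-- character lists (PySem convention).

-- ===== PORT A =====
-- literal transliteration of A's recursion on the character list; slices via PySem.List.slice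
def pvGoA (l : List Char) : Bool :=
  if _h : l.length ≤ 1 then true
  else
    let right : Int := (l.length : Int) - 1
    if PySem.List.pyGetD l 0 ' ' = ' ' then
      pvGoA (PySem.List.slice l (some 1) none)                 -- input_phrase[left+1:]
    else if PySem.List.pyGetD l right ' ' = ' ' then
      pvGoA (PySem.List.slice l none (some right))             -- input_phrase[:right]
    else if PySem.List.pyGetD l 0 ' ' = PySem.List.pyGetD l right ' ' then
      pvGoA (PySem.List.slice l (some 1) (some right))         -- input_phrase[left+1:right]
    else
      false
termination_by l.length
decreasing_by
  all_goals (simp [PySem.List.slice, PySem.List.clampIdx]; first | omega | (split_ifs <;> simp_all <;> omega))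

def is_palindrome_phrase (input_phrase : String) : Bool := pvGoA input_phrase.toList

-- ===== PORT B =====
def is_palindrome_phrase_alt (input_phrase : String) : Bool :=
  let letters := input_phrase.toList.filter (fun c => c != ' ')
  letters == letters.reverse

-- ===== PRECONDITION & SPEC =====
def Spec_is_palindrome_phrase (input_phrase : String) (out : Bool) : Prop := out = is_palindrome_phrase_alt input_phrase
instance (input_phrase : String) (out : Bool) : Decidable (Spec_is_palindrome_phrase input_phrase out) := by unfold Spec_is_palindrome_phrase; infer_instance

-- ===== CLAIM (what is proved, stated in full; the proofs are below) =====
def Claim_equal_is_palindrome_phrase : Prop := ∀ (input_phrase : String), Dom_is_palindrome_phrase input_phrase → Spec_is_palindrome_phrase input_phrase (is_palindrome_phrase input_phrase)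

-- ===== LEMMAS AND PROOFS =====

-- xs[:len-1] is the list without its last element
theorem pv_slice_init (l : List Char) (h : 1 < l.length) :
    PySem.List.slice l none (some ((l.length : Int) - 1)) = l.dropLast := by
  have h0 : (0:Int) ≤ (l.length : Int) - 1 := by omega
  rw [PySem.List.slice_to l h0, List.dropLast_eq_take]
  congr 1; omega

-- xs[1:len-1] is the middle part
theorem pv_slice_mid (l : List Char) (h : 1 < l.length) :
    PySem.List.slice l (some 1) (some ((l.length : Int) - 1)) = l.tail.dropLast := by
  rw [PySem.List.slice_toNat l (by norm_num) (by omega), List.dropLast_eq_take]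
  simp

-- xs[len-1] is the last element
theorem pv_get_last (init : List Char) (b d : Char) :
    PySem.List.pyGetD (init ++ [b]) (((init ++ [b]).length : Int) - 1) d = b := by
  have h0 : (0:Int) ≤ ((init ++ [b]).length : Int) - 1 := by simp
  have h1 : ((init ++ [b]).length : Int) - 1 < ((init ++ [b]).length : Int) := by omega
  rw [PySem.List.pyGetD_eq_getElem (init ++ [b]) d h0 h1]
  simp

-- a :: m ++ [a] is a palindrome iff m is
theorem pv_palin_sandwich (a : Char) (m : List Char) :
    ((a :: (m ++ [a]) : List Char) == (a :: (m ++ [a])).reverse) = (m == m.reverse) := by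
  rw [Bool.eq_iff_iff]
  simp [beq_iff_eq]

-- different ends: not a palindrome
theorem pv_not_palin (a b : Char) (m : List Char) (hab : a ≠ b) :
    ((a :: (m ++ [b]) : List Char) == (a :: (m ++ [b])).reverse) = false := by
  rw [beq_eq_false_iff_ne]
  intro h
  have hh := congrArg List.head? h
  simp at hh
  exact hab hh

-- main invariant: A's recursion computes B's filter-and-reverse check
theorem pv_goA_eq (l : List Char) :
    pvGoA l = ((l.filter (fun c => c != ' ')) == (l.filter (fun c => c != ' ')).reverse) := by
  induction l using pvGoA.induct with
  | case1 x h =>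
    rw [pvGoA]
    rw [dif_pos h]
    have hlen : (x.filter (fun c => c != ' ')).length ≤ 1 :=
      le_trans (List.length_filter_le _ _) h
    rcases hx : x.filter (fun c => c != ' ') with _ | ⟨y, ys⟩
    · simp
    · rw [hx] at hlen
      have hys : ys = [] := by cases ys with | nil => rfl | cons z zs => simp at hlen
      subst hys
      simp
  | case2 x h hsp ih =>
    rw [pvGoA, dif_neg h]
    simp only [if_pos hsp]
    rw [ih]
    match x, h with
    | c :: rest, _ =>
      have hc : c = ' ' := by simpa [PySem.List.pyGetD_zero_cons] using hsp
      simp [PySem.List.slice_from_one, hc]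
  | case3 x h right hsp hlast ih =>
    have hr : right = (x.length : Int) - 1 := rfl
    rw [hr] at hlast ih
    rw [pvGoA, dif_neg h]
    simp only [if_neg hsp, if_pos hlast]
    rw [ih, pv_slice_init x (by omega)]
    rcases List.eq_nil_or_concat x with hnil | ⟨init, b, rfl⟩
    · simp [hnil] at h
    · simp only [List.concat_eq_append] at *
      have hb : b = ' ' := by rw [pv_get_last] at hlast; exact hlast
      simp [hb, List.filter_append]
  | case4 x h right hsp hlast heq ih =>
    have hr : right = (x.length : Int) - 1 := rfl
    rw [hr] at hlast heq ih
    rw [pvGoA, dif_neg h]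
    simp only [if_neg hsp, if_neg hlast, if_pos heq]
    rw [ih, pv_slice_mid x (by omega)]
    match x, h, hsp, hlast, heq with
    | a :: rest, h, hsp, hlast, heq =>
      have hrest : rest ≠ [] := by intro hn; rw [hn] at h; simp at h
      rcases List.eq_nil_or_concat rest with hnil | ⟨mid, b, rfl⟩
      · exact absurd hnil hrest
      · simp only [List.concat_eq_append] at *
        have ha : PySem.List.pyGetD (a :: (mid ++ [b])) 0 ' ' = a := PySem.List.pyGetD_zero_cons ..
        have hbv : PySem.List.pyGetD (a :: (mid ++ [b])) (((a :: (mid ++ [b])).length : Int) - 1) ' ' = b := by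
          simpa using pv_get_last (a :: mid) b ' '
        rw [ha, hbv] at heq
        have ha' : a ≠ ' ' := by rw [ha] at hsp; exact hsp
        subst heq
        have hmid : (a :: (mid ++ [a])).tail.dropLast = mid := by simp
        rw [hmid]
        simp only [List.filter_cons, List.filter_append, bne_iff_ne, ne_eq, ha',
          not_false_eq_true, List.filter_nil]
        simpa using (pv_palin_sandwich a (mid.filter (fun c => c != ' '))).symm
  | case5 x h right hsp hlast hne =>
    have hr : right = (x.length : Int) - 1 := rfl
    rw [hr] at hlast hne
    rw [pvGoA, dif_neg h]
    simp only [if_neg hsp, if_neg hlast, if_neg hne]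
    match x, h, hsp, hlast, hne with
    | a :: rest, h, hsp, hlast, hne =>
      have hrest : rest ≠ [] := by intro hn; rw [hn] at h; simp at h
      rcases List.eq_nil_or_concat rest with hnil | ⟨mid, b, rfl⟩
      · exact absurd hnil hrest
      · simp only [List.concat_eq_append] at *
        have ha : PySem.List.pyGetD (a :: (mid ++ [b])) 0 ' ' = a := PySem.List.pyGetD_zero_cons ..
        have hbv : PySem.List.pyGetD (a :: (mid ++ [b])) (((a :: (mid ++ [b])).length : Int) - 1) ' ' = b := by
          simpa using pv_get_last (a :: mid) b ' '
        rw [ha, hbv] at hne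
        have ha' : a ≠ ' ' := by rw [ha] at hsp; exact hsp
        have hb' : b ≠ ' ' := by rw [hbv] at hlast; exact hlast
        simp only [List.filter_cons, List.filter_append, bne_iff_ne, ne_eq, ha', hb',
          not_false_eq_true, List.filter_nil]
        exact (pv_not_palin a b (mid.filter (fun c => c != ' ')) hne).symm

-- ===== VERDICT (by name: the statement is the Claim_ definition above) =====
theorem is_palindrome_phrase_spec : Claim_equal_is_palindrome_phrase := by
  intro s _
  unfold Spec_is_palindrome_phrase is_palindrome_phrase is_palindrome_phrase_alt
  exact pv_goA_eq s.toList
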